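-- pv_equiv track=rewrite | github.com/kasraRf/game-theory | main.py | vertical_man_best_response
-- ===== SOURCE A (Python) =====
-- def vertical_man_best_response(man_good_matrix,man_bad_matrix):
--      best_response_matrix=[]
--      for i in range(2):
--             if man_good_matrix[0][i]>man_good_matrix[1][i]:
--                 if man_bad_matrix[0][i]>man_bad_matrix[1][i]:
--                     best_response_matrix.append(['BB'])
--                 elif man_bad_matrix[0][i]<man_bad_matrix[1][i]:
--                     best_response_matrix.append(['BS'])
--                 else:
--                     best_response_matrix.append(['BB','BS'])
--             elif man_good_matrix[0][i]<man_good_matrix[1][i]: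
--                 if man_bad_matrix[0][i]>man_bad_matrix[1][i]:
--                     best_response_matrix.append(['SB'])
--                 elif man_bad_matrix[0][i]<man_bad_matrix[1][i]:
--                     best_response_matrix.append(['SS'])
--                 else :
--                     best_response_matrix.append(['SB','SS'])
--             else:
--                 if man_bad_matrix[0][i]>man_bad_matrix[1][i]:
--                     best_response_matrix.append(['BB','SB'])
--                 elif man_bad_matrix[0][i]<man_bad_matrix[1][i]:
--                     best_response_matrix.append(['BS','SS'])
--                 else:
--                     best_response_matrix.append(['BB','BS','SB','SS'])
--      return best_response_matrix
-- ===== SOURCE B (Python) =====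
-- def vertical_man_best_response(man_good_matrix, man_bad_matrix):
--     def group(top, bottom, hi, lo):
--         if top > bottom:
--             return [hi]
--         if top < bottom:
--             return [lo]
--         return [hi, lo]
--
--     result = []
--     for i in range(2):
--         good = group(man_good_matrix[0][i], man_good_matrix[1][i], 'B', 'S')
--         bad = group(man_bad_matrix[0][i], man_bad_matrix[1][i], 'B', 'S')
--         result.append([g + b for g in good for b in bad])
--     return result
-- ===== Notes on version B (the rewrite author's own statement) =====
-- stated objective: simpler
-- what changed: Replaces the 9-way nested if-tree with two independent 3-way classifications per column (good and bad row comparisons) combined by a Cartesian product of the letters.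
import Mathlib
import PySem

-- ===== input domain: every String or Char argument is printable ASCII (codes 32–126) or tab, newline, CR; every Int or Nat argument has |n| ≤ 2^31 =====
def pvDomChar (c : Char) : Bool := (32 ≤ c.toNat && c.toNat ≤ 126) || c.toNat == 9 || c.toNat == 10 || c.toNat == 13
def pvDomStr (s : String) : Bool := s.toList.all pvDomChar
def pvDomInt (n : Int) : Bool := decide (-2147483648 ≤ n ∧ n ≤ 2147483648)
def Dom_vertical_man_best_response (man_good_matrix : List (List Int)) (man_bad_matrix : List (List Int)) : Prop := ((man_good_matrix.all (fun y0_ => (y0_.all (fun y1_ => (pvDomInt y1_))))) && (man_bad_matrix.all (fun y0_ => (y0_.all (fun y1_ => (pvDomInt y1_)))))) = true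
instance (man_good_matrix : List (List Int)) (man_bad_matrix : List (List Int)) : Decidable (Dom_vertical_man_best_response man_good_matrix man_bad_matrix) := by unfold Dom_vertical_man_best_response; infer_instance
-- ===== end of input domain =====

-- B replaces A's 9-way nested if-tree with two independent 3-way classifications per column combined by a Cartesian product (simpler decomposition).


-- ===== PORT A =====
-- m[r][i]: exact on Pre_ inputs (both indices in range there)
def pvCell (m : List (List Int)) (r i : Int) : Int :=
  (PySem.List.pyGet? ((PySem.List.pyGet? m r).getD []) i).getD 0

def vertical_man_best_response (man_good_matrix : List (List Int)) (man_bad_matrix : List (List Int)) : List (List String) :=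
  (PySem.List.pyRange 0 2 1).foldl (fun best_response_matrix i =>
    if pvCell man_good_matrix 0 i > pvCell man_good_matrix 1 i then
      if pvCell man_bad_matrix 0 i > pvCell man_bad_matrix 1 i then
        best_response_matrix ++ [["BB"]]
      else if pvCell man_bad_matrix 0 i < pvCell man_bad_matrix 1 i then
        best_response_matrix ++ [["BS"]]
      else
        best_response_matrix ++ [["BB", "BS"]]
    else if pvCell man_good_matrix 0 i < pvCell man_good_matrix 1 i then
      if pvCell man_bad_matrix 0 i > pvCell man_bad_matrix 1 i then
        best_response_matrix ++ [["SB"]]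
      else if pvCell man_bad_matrix 0 i < pvCell man_bad_matrix 1 i then
        best_response_matrix ++ [["SS"]]
      else
        best_response_matrix ++ [["SB", "SS"]]
    else
      if pvCell man_bad_matrix 0 i > pvCell man_bad_matrix 1 i then
        best_response_matrix ++ [["BB", "SB"]]
      else if pvCell man_bad_matrix 0 i < pvCell man_bad_matrix 1 i then
        best_response_matrix ++ [["BS", "SS"]]
      else
        best_response_matrix ++ [["BB", "BS", "SB", "SS"]]) []

-- ===== PORT B =====
def pvGroup (top bottom : Int) (hi lo : String) : List String :=
  if top > bottom then [hi]
  else if top < bottom then [lo]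
  else [hi, lo]

def vertical_man_best_response_alt (man_good_matrix : List (List Int)) (man_bad_matrix : List (List Int)) : List (List String) :=
  (PySem.List.pyRange 0 2 1).foldl (fun result i =>
    let good := pvGroup (pvCell man_good_matrix 0 i) (pvCell man_good_matrix 1 i) "B" "S"
    let bad := pvGroup (pvCell man_bad_matrix 0 i) (pvCell man_bad_matrix 1 i) "B" "S"
    result ++ [good.flatMap (fun g => bad.map (fun b => g ++ b))]) []

-- ===== PRECONDITION & SPEC =====
-- Pre_: A indexes rows 0 and 1 and columns 0 and 1 of both matrices; anything smaller raises IndexError.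
def Pre_vertical_man_best_response (man_good_matrix : List (List Int)) (man_bad_matrix : List (List Int)) : Prop :=
  2 ≤ man_good_matrix.length ∧ 2 ≤ man_good_matrix.headI.length ∧ 2 ≤ (man_good_matrix.drop 1).headI.length ∧
  2 ≤ man_bad_matrix.length ∧ 2 ≤ man_bad_matrix.headI.length ∧ 2 ≤ (man_bad_matrix.drop 1).headI.length
instance (man_good_matrix : List (List Int)) (man_bad_matrix : List (List Int)) : Decidable (Pre_vertical_man_best_response man_good_matrix man_bad_matrix) := by unfold Pre_vertical_man_best_response; infer_instance

def pvWitness_vertical_man_best_response : List (List Int) × List (List Int) := ([[1, 2], [3, 4]], [[5, 6], [7, 8]])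

def Spec_vertical_man_best_response (man_good_matrix : List (List Int)) (man_bad_matrix : List (List Int)) (out : List (List String)) : Prop := out = vertical_man_best_response_alt man_good_matrix man_bad_matrix
instance (man_good_matrix : List (List Int)) (man_bad_matrix : List (List Int)) (out : List (List String)) : Decidable (Spec_vertical_man_best_response man_good_matrix man_bad_matrix out) := by unfold Spec_vertical_man_best_response; infer_instance

-- ===== CLAIM (what is proved, stated in full; the proofs are below) =====
def Claim_equal_vertical_man_best_response : Prop := ∀ (man_good_matrix : List (List Int)) (man_bad_matrix : List (List Int)), Dom_vertical_man_best_response man_good_matrix man_bad_matrix → Pre_vertical_man_best_response man_good_matrix man_bad_matrix → Spec_vertical_man_best_response man_good_matrix man_bad_matrix (vertical_man_best_response man_good_matrix man_bad_matrix)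

-- ===== LEMMAS AND PROOFS =====
-- One step of A's tree (with accumulator) equals B's step for that column.
theorem pv_column_eq (g0 g1 b0 b1 : Int) (acc : List (List String)) :
    (if g0 > g1 then
        if b0 > b1 then acc ++ [["BB"]]
        else if b0 < b1 then acc ++ [["BS"]]
        else acc ++ [["BB", "BS"]]
      else if g0 < g1 then
        if b0 > b1 then acc ++ [["SB"]]
        else if b0 < b1 then acc ++ [["SS"]]
        else acc ++ [["SB", "SS"]]
      else
        if b0 > b1 then acc ++ [["BB", "SB"]]
        else if b0 < b1 then acc ++ [["BS", "SS"]]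
        else acc ++ [["BB", "BS", "SB", "SS"]])
    = acc ++ [(pvGroup g0 g1 "B" "S").flatMap (fun g => (pvGroup b0 b1 "B" "S").map (fun b => g ++ b))] := by
  unfold pvGroup
  split_ifs <;> rfl

-- ===== VERDICT (by name: the statement is the Claim_ definition above) =====
theorem vertical_man_best_response_spec : Claim_equal_vertical_man_best_response := by
  intro g b _ _
  unfold Spec_vertical_man_best_response vertical_man_best_response vertical_man_best_response_alt
  have h2 : PySem.List.pyRange 0 2 1 = [0, 1] := by decide
  rw [h2]
  simp only [List.foldl, pv_column_eq]
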